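-- pv_equiv track=rewrite | github.com/sekocha/pyclupan | src/pyclupan/misc/dd/dd_node.py | set_excluding_elements_dd
-- ===== SOURCE A (Python) =====
-- def set_excluding_elements_dd(elements_lattice):
--
--     elements_dd_exclude = []
--     for ele1 in elements_lattice:
--         common = False
--         for ele2 in elements_lattice:
--             if tuple(ele1) != tuple(ele2) \
--                 and len(set(ele1) & set(ele2)) > 0:
--                 common = True
--                 break
--         if common == False:
--             elements_dd_exclude.append(ele1[-1])
--
--     return elements_dd_exclude
-- ===== SOURCE B (Python) =====
-- def set_excluding_elements_dd(elements_lattice):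
--     # one pass: count, per element value, in how many DISTINCT lattices it occurs
--     cnt = {}
--     seen = set()
--     for ele in elements_lattice:
--         t = tuple(ele)
--         if t not in seen:
--             seen.add(t)
--             for x in set(ele):
--                 cnt[x] = cnt.get(x, 0) + 1
--     return [ele[-1] for ele in elements_lattice
--             if all(cnt.get(x, 0) == 1 for x in ele)]
-- ===== Notes on version B (the rewrite author's own statement) =====
-- stated objective: alternative
-- what changed: Replaced the all-pairs intersection scan by a single pass that counts, for each element value, in how many distinct lattices it occurs, then keeps a lattice iff all its elements have count 1; it trades the nested scan (which exits early on random data) for one hash-index pass.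
import Mathlib
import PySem

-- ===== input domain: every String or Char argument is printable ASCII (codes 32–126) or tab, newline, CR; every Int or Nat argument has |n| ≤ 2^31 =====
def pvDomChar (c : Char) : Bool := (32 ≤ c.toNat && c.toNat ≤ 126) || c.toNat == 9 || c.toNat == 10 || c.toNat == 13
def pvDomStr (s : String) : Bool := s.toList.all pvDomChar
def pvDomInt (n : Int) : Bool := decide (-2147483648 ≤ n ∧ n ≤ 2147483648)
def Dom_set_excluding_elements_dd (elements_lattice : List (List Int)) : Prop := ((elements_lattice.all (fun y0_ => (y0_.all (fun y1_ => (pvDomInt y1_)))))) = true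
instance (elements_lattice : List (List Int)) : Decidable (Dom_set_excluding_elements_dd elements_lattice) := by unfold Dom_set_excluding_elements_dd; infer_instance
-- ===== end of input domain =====

-- ===== PORT A =====
-- B replaces A's all-pairs intersection scan with a single pass counting, per element value,
-- the number of distinct lattices containing it (objective: alternative).
def set_excluding_elements_dd (elements_lattice : List (List Int)) : List Int :=
  elements_lattice.foldl (fun acc ele1 =>
    -- inner 'for ele2 …: … break' loop folded as an or-accumulator (break only early-exits)
    let common := elements_lattice.foldl (fun c ele2 =>
      c || (decide (ele1 ≠ ele2) &&
            decide (0 < PySem.Set.len (PySem.Set.inter (PySem.Set.ofList ele1) (PySem.Set.ofList ele2))))) false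
    if common = false then acc ++ [PySem.List.pyGetD ele1 (-1) 0] else acc) []

-- ===== PORT B =====
def set_excluding_elements_dd_alt (elements_lattice : List (List Int)) : List Int :=
  let st := elements_lattice.foldl
    (fun (p : PySem.Dict Int Int × PySem.Set (List Int)) ele =>
      if PySem.Set.contains p.2 ele then p
      else ((PySem.Set.ofList ele).foldl (fun d x => d.insert x (d.getD x 0 + 1)) p.1,
            PySem.Set.add p.2 ele))
    (PySem.Dict.empty, PySem.Set.empty)
  elements_lattice.foldl (fun acc ele =>
    if ele.all (fun x => st.1.getD x 0 == 1) then acc ++ [PySem.List.pyGetD ele (-1) 0]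
    else acc) []

-- ===== PRECONDITION & SPEC =====
-- Pre_ excludes inputs containing an empty inner list: there both A and B raise IndexError on ele[-1].
def Pre_set_excluding_elements_dd (elements_lattice : List (List Int)) : Prop :=
  ∀ e ∈ elements_lattice, e ≠ []
instance (elements_lattice : List (List Int)) : Decidable (Pre_set_excluding_elements_dd elements_lattice) := by unfold Pre_set_excluding_elements_dd; infer_instance
def pvWitness_set_excluding_elements_dd : List (List Int) := [[1, 2], [3]]
def Spec_set_excluding_elements_dd (elements_lattice : List (List Int)) (out : List Int) : Prop := out = set_excluding_elements_dd_alt elements_lattice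
instance (elements_lattice : List (List Int)) (out : List Int) : Decidable (Spec_set_excluding_elements_dd elements_lattice out) := by unfold Spec_set_excluding_elements_dd; infer_instance

-- ===== CLAIM (what is proved, stated in full; the proofs are below) =====
def Claim_equal_set_excluding_elements_dd : Prop := ∀ (elements_lattice : List (List Int)), Dom_set_excluding_elements_dd elements_lattice → Pre_set_excluding_elements_dd elements_lattice → Spec_set_excluding_elements_dd elements_lattice (set_excluding_elements_dd elements_lattice)

-- ===== LEMMAS AND PROOFS =====

-- an or-accumulator fold is 'any'
lemma pv_foldl_or {a : Type} (f : a -> Bool) (l : List a) (b : Bool) :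
    l.foldl (fun c x => c || f x) b = (b || l.any f) := by
  induction l generalizing b with
  | nil => simp
  | cons y t ih => simp [ih, Bool.or_assoc]

-- A's inner test: distinct lattices sharing an element
lemma pv_test_iff (e1 e2 : List Int) :
    ((decide (e1 ≠ e2) &&
      decide (0 < PySem.Set.len (PySem.Set.inter (PySem.Set.ofList e1) (PySem.Set.ofList e2)))) = true)
    ↔ e1 ≠ e2 ∧ ∃ x ∈ e1, x ∈ e2 := by
  simp only [Bool.and_eq_true, decide_eq_true_eq, PySem.Set.len_eq]
  apply and_congr_right
  intro _
  rw [Int.natCast_pos, List.length_pos_iff_exists_mem]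
  constructor
  · rintro ⟨x, hx⟩
    rw [PySem.Set.mem_inter, PySem.Set.mem_ofList, PySem.Set.mem_ofList] at hx
    exact ⟨x, hx.1, hx.2⟩
  · rintro ⟨x, h1, h2⟩
    exact ⟨x, by rw [PySem.Set.mem_inter, PySem.Set.mem_ofList, PySem.Set.mem_ofList]; exact ⟨h1, h2⟩⟩

-- A's inner loop: 'common' stays false iff no distinct lattice shares an element
lemma pv_common_eq_false (L : List (List Int)) (e1 : List Int) :
    (L.foldl (fun c ele2 =>
        c || (decide (e1 ≠ ele2) &&
              decide (0 < PySem.Set.len (PySem.Set.inter (PySem.Set.ofList e1) (PySem.Set.ofList ele2))))) false = false)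
    ↔ ∀ e2 ∈ L, e1 ≠ e2 → ∀ x ∈ e1, x ∉ e2 := by
  rw [pv_foldl_or]
  simp only [Bool.false_or, List.any_eq_false, pv_test_iff, not_and, not_exists]

-- count of a value in a deduplicated list
lemma pv_count_ofList (e : List Int) (v : Int) :
    (PySem.Set.ofList e).count v = (if v ∈ e then 1 else 0) := by
  by_cases h : v ∈ e
  · rw [if_pos h]
    exact List.count_eq_one_of_mem (PySem.Set.nodup_ofList e) ((PySem.Set.mem_ofList e v).mpr h)
  · rw [if_neg h]
    exact List.count_eq_zero.mpr (fun hc => h ((PySem.Set.mem_ofList e v).mp hc))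

-- invariant of B's counting pass
lemma pv_cnt_inv (L : List (List Int)) (d : PySem.Dict Int Int) (s : PySem.Set (List Int))
    (hs : s.Nodup) (v : Int) :
    ((L.foldl (fun (p : PySem.Dict Int Int × PySem.Set (List Int)) ele =>
        if PySem.Set.contains p.2 ele then p
        else ((PySem.Set.ofList ele).foldl (fun d x => d.insert x (d.getD x 0 + 1)) p.1,
              PySem.Set.add p.2 ele)) (d, s)).1).getD v 0
      + ((s.countP (fun t => decide (v ∈ t)) : Int))
    = d.getD v 0 + (((PySem.Set.update s L).countP (fun t => decide (v ∈ t)) : Int)) := by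
  induction L generalizing d s with
  | nil => simp [PySem.Set.update]
  | cons e L ih =>
    show ((L.foldl _ (if PySem.Set.contains s e then (d, s) else _)).1).getD v 0 + _ = _
    have hupd : PySem.Set.update s (e :: L) = PySem.Set.update (PySem.Set.add s e) L := rfl
    rw [hupd]
    by_cases hc : PySem.Set.contains s e = true
    · have hadd : PySem.Set.add s e = s := by simp [PySem.Set.add, (PySem.Set.contains_iff s e).mp hc]
      rw [if_pos hc, hadd]
      exact ih d s hs
    · have hmem : e ∉ s := fun hm => hc ((PySem.Set.contains_iff s e).mpr hm)
      have hadd : PySem.Set.add s e = s ++ [e] := by simp [PySem.Set.add, hmem]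
      rw [if_neg hc]
      dsimp only
      have hnodup : (PySem.Set.add s e).Nodup := PySem.Set.nodup_add s e hs
      have hthis := ih ((PySem.Set.ofList e).foldl (fun d x => d.insert x (d.getD x 0 + 1)) d) (PySem.Set.add s e) hnodup
      rw [PySem.Dict.getD_foldl_insert_add_one, pv_count_ofList] at hthis
      have hcadd : (List.countP (fun t => decide (v ∈ t)) (PySem.Set.add s e))
          = List.countP (fun t => decide (v ∈ t)) s + (if v ∈ e then 1 else 0) := by
        rw [hadd, List.countP_append]
        by_cases hv : v ∈ e <;> simp [hv]
      rw [hcadd] at hthis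
      by_cases hv : v ∈ e <;> simp only [hv, if_true, if_false] at hthis ⊢ <;> push_cast at hthis ⊢ <;> linarith [hthis]

-- B's counter: per value, the number of distinct lattices containing it
lemma pv_cnt_spec (L : List (List Int)) (v : Int) :
    ((L.foldl (fun (p : PySem.Dict Int Int × PySem.Set (List Int)) ele =>
        if PySem.Set.contains p.2 ele then p
        else ((PySem.Set.ofList ele).foldl (fun d x => d.insert x (d.getD x 0 + 1)) p.1,
              PySem.Set.add p.2 ele)) (PySem.Dict.empty, PySem.Set.empty)).1).getD v 0
    = ((PySem.Set.ofList L).countP (fun t => decide (v ∈ t)) : Int) := by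
  have h := pv_cnt_inv L PySem.Dict.empty PySem.Set.empty (by simp [PySem.Set.empty]) v
  have hup : PySem.Set.update PySem.Set.empty L = PySem.Set.ofList L := (PySem.Set.ofList_eq_foldl L).symm
  have hd : (PySem.Dict.empty : PySem.Dict Int Int).getD v 0 = 0 := rfl
  simpa [PySem.Set.empty, hup, hd] using h

-- a predicate true at a member of a nodup list holds exactly once iff nowhere else
lemma pv_countP_eq_one_iff {a : Type} [DecidableEq a] (l : List a) (p : a -> Bool) (hn : l.Nodup)
    (x : a) (hx : x ∈ l) (hpx : p x = true) :
    l.countP p = 1 ↔ ∀ b ∈ l, p b = true → b = x := by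
  induction l with
  | nil => cases hx
  | cons y t ih =>
    rcases List.nodup_cons.mp hn with ⟨hyt, hnt⟩
    rcases List.mem_cons.mp hx with rfl | hxt
    · rw [List.countP_cons, if_pos hpx]
      constructor
      · intro h b hb hpb
        rcases List.mem_cons.mp hb with rfl | hbt
        · rfl
        · have h0 : t.countP p = 0 := by omega
          exact absurd hpb (by simpa using (List.countP_eq_zero.mp h0) b hbt)
      · intro h
        have h0 : t.countP p = 0 := List.countP_eq_zero.mpr (fun b hb hpb => hyt (h b (List.mem_cons_of_mem _ hb) hpb ▸ hb))
        omega
    · have hxy : x ≠ y := fun he => hyt (he ▸ hxt)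
      rw [List.countP_cons]
      by_cases hpy : p y = true
      · rw [if_pos hpy]
        have hpos : 0 < t.countP p := List.countP_pos_iff.mpr ⟨x, hxt, hpx⟩
        constructor
        · intro h; omega
        · intro h
          exact absurd (h y (List.mem_cons_self) hpy).symm hxy
      · rw [if_neg hpy]
        simp only [add_zero]
        rw [ih hnt hxt]
        constructor
        · intro h b hb hpb
          rcases List.mem_cons.mp hb with rfl | hbt
          · exact absurd hpb hpy
          · exact h b hbt hpb
        · intro h b hb hpb
          exact h b (List.mem_cons_of_mem _ hb) hpb

-- the per-lattice conditions of A and B agree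
lemma pv_cond_iff (L : List (List Int)) (e : List Int) (he : e ∈ L) :
    (L.foldl (fun c ele2 =>
        c || (decide (e ≠ ele2) &&
              decide (0 < PySem.Set.len (PySem.Set.inter (PySem.Set.ofList e) (PySem.Set.ofList ele2))))) false = false)
    ↔ (e.all (fun x =>
        ((L.foldl (fun (p : PySem.Dict Int Int × PySem.Set (List Int)) ele =>
            if PySem.Set.contains p.2 ele then p
            else ((PySem.Set.ofList ele).foldl (fun d x => d.insert x (d.getD x 0 + 1)) p.1,
                  PySem.Set.add p.2 ele)) (PySem.Dict.empty, PySem.Set.empty)).1).getD x 0 == 1) = true) := by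
  rw [pv_common_eq_false]
  simp only [List.all_eq_true, pv_cnt_spec, beq_iff_eq]
  have hcnt : ∀ x ∈ e, ((((PySem.Set.ofList L).countP (fun t => decide (x ∈ t)) : Int)) = 1
      ↔ ∀ t ∈ L, x ∈ t → t = e) := by
    intro x hx
    rw [show ((((PySem.Set.ofList L).countP (fun t => decide (x ∈ t)) : Int)) = 1)
        ↔ ((PySem.Set.ofList L).countP (fun t => decide (x ∈ t)) = 1) by exact_mod_cast Iff.rfl]
    rw [pv_countP_eq_one_iff _ _ (PySem.Set.nodup_ofList L) e ((PySem.Set.mem_ofList L e).mpr he) (by simpa using hx)]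
    constructor
    · intro h t ht hxt
      exact h t ((PySem.Set.mem_ofList L t).mpr ht) (by simpa using hxt)
    · intro h t ht hxt
      exact h t ((PySem.Set.mem_ofList L t).mp ht) (by simpa using hxt)
  constructor
  · intro h x hx
    rw [hcnt x hx]
    intro t ht hxt
    by_contra hne
    exact (h t ht (fun he2 => hne he2.symm)) x hx hxt
  · intro h t ht hne x hx hxt
    exact hne (((hcnt x hx).mp (h x hx)) t ht hxt).symm

-- ===== VERDICT (by name: the statement is the Claim_ definition above) =====
theorem set_excluding_elements_dd_spec : Claim_equal_set_excluding_elements_dd := by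
  intro L _ _
  unfold Spec_set_excluding_elements_dd set_excluding_elements_dd set_excluding_elements_dd_alt
  refine PySem.List.foldl_congr_mem L _ _ [] (fun acc e he => ?_)
  have h := pv_cond_iff L e he
  by_cases hb : (e.all (fun x =>
      ((L.foldl (fun (p : PySem.Dict Int Int × PySem.Set (List Int)) ele =>
          if PySem.Set.contains p.2 ele then p
          else ((PySem.Set.ofList ele).foldl (fun d x => d.insert x (d.getD x 0 + 1)) p.1,
                PySem.Set.add p.2 ele)) (PySem.Dict.empty, PySem.Set.empty)).1).getD x 0 == 1) = true)
  · simp only [if_pos (h.mpr hb), if_pos hb]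
  · simp only [if_neg (fun hc => hb (h.mp hc)), if_neg hb]
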